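-- pv_equiv track=rewrite | github.com/AkakiMacharashvili/RationalInterpolation | rationalInterpolation.py | zooming_neighbor
-- ===== SOURCE A (Python) =====
-- def zooming_neighbor(matrix, k):
--     n = len(matrix)
--     m = len(matrix[0])
--     ans = []
--     for i in range(k * n):
--         cur = []
--         for j in range(k * m):
--             cur.append('inf')
--         ans.append(cur)
--
--     for i in range(n):
--         for j in range(m):
--             ans[i * k][j * k] = matrix[i][j]
--
--     for i in range(k * n):
--         for j in range(k * m):
--             cur_i = i - i % k
--             cur_j = j - j % k
--             ans[i][j] = ans[cur_i][cur_j]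
--
--     return ans
-- ===== SOURCE B (Python) =====
-- def zooming_neighbor(matrix, k):
--     n = len(matrix)
--     m = len(matrix[0])
--     return [[matrix[i // k][j // k] for j in range(k * m)] for i in range(k * n)]
-- ===== Notes on version B (the rewrite author's own statement) =====
-- stated objective: simpler
-- what changed: Replaces A's three-phase allocate/scatter/propagate over an 'inf'-filled grid with a single direct-indexing pass that computes each output cell as matrix[i//k][j//k].
-- crash fix: On a nonempty matrix with a nonempty first row and k <= 0, A raises IndexError (it indexes into the empty preallocated grid), while B returns [] since all ranges are empty. — e.g. on zooming_neighbor([[1, 2]], 0): A raises IndexError, B returns []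
import Mathlib
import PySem

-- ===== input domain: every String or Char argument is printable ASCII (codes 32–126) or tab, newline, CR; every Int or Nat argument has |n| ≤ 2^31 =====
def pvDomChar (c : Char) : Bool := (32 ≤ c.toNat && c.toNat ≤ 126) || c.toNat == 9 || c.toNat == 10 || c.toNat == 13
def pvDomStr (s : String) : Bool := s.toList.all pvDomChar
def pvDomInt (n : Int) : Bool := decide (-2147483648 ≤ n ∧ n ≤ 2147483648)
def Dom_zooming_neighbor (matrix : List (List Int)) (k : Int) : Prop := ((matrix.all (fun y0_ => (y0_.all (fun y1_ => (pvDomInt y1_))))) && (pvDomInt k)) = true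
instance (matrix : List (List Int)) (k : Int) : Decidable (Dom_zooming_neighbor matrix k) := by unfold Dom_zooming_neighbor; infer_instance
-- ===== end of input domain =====

-- B replaces A's three-phase allocate/scatter/propagate (over an 'inf'-filled grid) with a single
-- direct-indexing pass (out[i][j] = matrix[i//k][j//k]); objective: simpler.

-- ===== PORT A =====
-- helper for the Python statement `ans[i][j] = v` (in-place assignment into a list of lists)
def pvWrite (g : List (List Int)) (i j : Nat) (v : Int) : List (List Int) :=
  g.modify i (fun row => row.set j v)

-- helper for the Python expression `ans[a][b]` (indices here are always in range under Pre_)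
def pvCell (g : List (List Int)) (a b : Nat) : Int := (g.getD a []).getD b 0

-- Literal port of A. `range(k*n)` is empty for k ≤ 0, hence `List.range (k.toNat * n)`.
-- Python fills the grid with the string 'inf'; modeled by the Int 0 — under Pre_ every cell is
-- overwritten before the grid is returned, so the sentinel never reaches the output.
def zooming_neighbor (matrix : List (List Int)) (k : Int) : List (List Int) :=
  let n := matrix.length
  let m := (matrix.getD 0 []).length   -- matrix[0]; matrix = [] (IndexError) is excluded by Pre_
  let kn := k.toNat
  let ans0 : List (List Int) :=
    (List.range (kn * n)).map (fun _ => (List.range (kn * m)).map (fun _ => (0 : Int)))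
  let ans1 :=
    (List.range n).foldl (fun g i =>
      (List.range m).foldl (fun g j =>
        pvWrite g (i * kn) (j * kn) ((matrix.getD i []).getD j 0)) g) ans0
  (List.range (kn * n)).foldl (fun g i =>
    (List.range (kn * m)).foldl (fun g j =>
      pvWrite g i j (pvCell g (i - i % kn) (j - j % kn))) g) ans1

-- ===== PORT B =====
-- Literal port of B: one direct-indexing comprehension; i // k = i / k.toNat for the
-- nonnegative indices produced by the ranges (ranges are empty for k ≤ 0, as in Python).
def zooming_neighbor_alt (matrix : List (List Int)) (k : Int) : List (List Int) :=
  let n := matrix.length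
  let m := (matrix.getD 0 []).length
  let kn := k.toNat
  (List.range (kn * n)).map (fun i =>
    (List.range (kn * m)).map (fun j => (matrix.getD (i / kn) []).getD (j / kn) 0))

-- ===== PRECONDITION & SPEC =====
-- Pre_ excludes exactly the inputs where Python A raises IndexError: the empty matrix
-- (matrix[0]), k ≤ 0 with a nonempty first row (A indexes into the empty preallocated grid),
-- and ragged matrices whose later rows are shorter than row 0 (matrix[i][j] out of range).
def Pre_zooming_neighbor (matrix : List (List Int)) (k : Int) : Prop :=
  matrix ≠ [] ∧
    ((matrix.headD []).length = 0 ∨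
      (1 ≤ k ∧ ∀ r ∈ matrix, (matrix.headD []).length ≤ r.length))
instance (matrix : List (List Int)) (k : Int) : Decidable (Pre_zooming_neighbor matrix k) := by
  unfold Pre_zooming_neighbor; infer_instance

def pvWitness_zooming_neighbor : List (List Int) × Int := ([[1, 2], [3, 4]], 2)

-- On a nonempty matrix with a nonempty first row and k ≤ 0, A raises IndexError (it indexes
-- into the empty preallocated grid), while B returns [] since all its ranges are empty.
def Raises_zooming_neighbor (matrix : List (List Int)) (k : Int) : Prop :=
  matrix ≠ [] ∧ 1 ≤ (matrix.headD []).length ∧ k ≤ 0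
instance (matrix : List (List Int)) (k : Int) : Decidable (Raises_zooming_neighbor matrix k) := by
  unfold Raises_zooming_neighbor; infer_instance
def pvRaiseWitness_zooming_neighbor : List (List Int) × Int := ([[1, 2]], 0)
def pvRaiseWitnessOut_zooming_neighbor : List (List Int) := []

def Spec_zooming_neighbor (matrix : List (List Int)) (k : Int) (out : List (List Int)) : Prop := out = zooming_neighbor_alt matrix k
instance (matrix : List (List Int)) (k : Int) (out : List (List Int)) : Decidable (Spec_zooming_neighbor matrix k out) := by unfold Spec_zooming_neighbor; infer_instance

-- ===== CLAIM (what is proved, stated in full; the proofs are below) =====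
def Claim_equal_zooming_neighbor : Prop := ∀ (matrix : List (List Int)) (k : Int), Dom_zooming_neighbor matrix k → Pre_zooming_neighbor matrix k → Spec_zooming_neighbor matrix k (zooming_neighbor matrix k)
def Claim_raises_zooming_neighbor : Prop := (∀ (matrix : List (List Int)) (k : Int), Dom_zooming_neighbor matrix k → Raises_zooming_neighbor matrix k → ¬ Pre_zooming_neighbor matrix k) ∧ (Dom_zooming_neighbor (pvRaiseWitness_zooming_neighbor.1) (pvRaiseWitness_zooming_neighbor.2) ∧ Raises_zooming_neighbor (pvRaiseWitness_zooming_neighbor.1) (pvRaiseWitness_zooming_neighbor.2) ∧ zooming_neighbor_alt (pvRaiseWitness_zooming_neighbor.1) (pvRaiseWitness_zooming_neighbor.2) = pvRaiseWitnessOut_zooming_neighbor)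

-- ===== LEMMAS AND PROOFS =====

-- a predicate preserved by every fold step holds of the fold
lemma pv_foldl_preserve {α β : Type} (P : β → Prop) (L : List α) (f : β → α → β)
    (h : ∀ g a, P g → P (f g a)) : ∀ g, P g → P (L.foldl f g) := by
  induction L with
  | nil => intro g hg; exact hg
  | cons x xs ih => intro g hg; exact ih _ (h g x hg)

-- effect of one write on one cell (read cell in range)
lemma pvCell_write (g : List (List Int)) (i j a b : Nat) (v : Int)
    (ha : a < g.length) (hb : b < (g.getD a []).length) :
    pvCell (pvWrite g i j v) a b = if a = i ∧ b = j then v else pvCell g a b := by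
  have hb' : b < g[a].length := by rwa [List.getD_eq_getElem _ _ ha] at hb
  have hlen : a < (pvWrite g i j v).length := by
    rw [pvWrite, List.length_modify]; exact ha
  have hrowlen : b < ((pvWrite g i j v)[a]'hlen).length := by
    simp only [pvWrite, List.getElem_modify]
    by_cases hia : i = a
    · rw [if_pos hia, List.length_set]; exact hb'
    · rw [if_neg hia]; exact hb'
  unfold pvCell
  rw [List.getD_eq_getElem _ _ hlen, List.getD_eq_getElem _ _ hrowlen,
      List.getD_eq_getElem _ _ ha, List.getD_eq_getElem _ _ hb']
  by_cases hia : i = a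
  · subst hia
    by_cases hjb : j = b
    · subst hjb
      simp [pvWrite]
    · have hbj : b ≠ j := fun h => hjb h.symm
      simp [pvWrite, hjb, hbj]
  · have hai : a ≠ i := fun h => hia h.symm
    simp [pvWrite, hia, hai]

-- grid shape: N rows, each of length M
def pvShape (N M : Nat) (g : List (List Int)) : Prop :=
  g.length = N ∧ ∀ a, a < N → (g.getD a []).length = M

lemma pvShape_write (N M : Nat) (g : List (List Int)) (i j : Nat) (v : Int)
    (hg : pvShape N M g) :
    pvShape N M (pvWrite g i j v) := by
  obtain ⟨hlen, hrow⟩ := hg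
  constructor
  · rw [pvWrite, List.length_modify, hlen]
  · intro a ha
    have ha' : a < g.length := by omega
    have hga : g.getD a [] = g[a] := by
      rw [List.getD_eq_getElem?_getD, List.getElem?_eq_getElem ha']; rfl
    have hval := hrow a ha
    rw [hga] at hval
    rw [pvWrite, List.getD_eq_getElem?_getD, List.getElem?_modify,
        List.getElem?_eq_getElem ha']
    by_cases hai : i = a
    · subst hai
      simp [List.length_set, hval]
    · simp [hai, hval]

-- a nested fold over range A × range B is the fold over ranks t < A*B with (i,j) = (t/B, t%B)
lemma pv_foldl_nested_rank {β : Type} (A B : Nat) (step : β → Nat → Nat → β) (g : β) :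
    (List.range A).foldl (fun g i => (List.range B).foldl (fun g j => step g i j) g) g
      = (List.range (A * B)).foldl (fun g t => step g (t / B) (t % B)) g := by
  rcases Nat.eq_zero_or_pos B with hB | hB
  · subst hB; simp
  · induction A generalizing g with
    | zero => simp
    | succ A ih =>
      rw [List.range_succ, List.foldl_append, ih,
          show (A + 1) * B = A * B + B by ring, List.range_add, List.foldl_append,
          List.foldl_map, List.foldl_cons, List.foldl_nil]
      refine PySem.List.foldl_congr_mem _ _ _ _ ?_
      intro acc j hj
      have hjB : j < B := List.mem_range.mp hj
      have h1 : (A * B + j) / B = A := by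
        rw [Nat.mul_comm A B, Nat.mul_add_div hB, Nat.div_eq_of_lt hjB]
        omega
      have h2 : (A * B + j) % B = j := by
        rw [Nat.mul_comm A B, Nat.mul_add_mod, Nat.mod_eq_of_lt hjB]
      rw [h1, h2]


-- the initial grid: right shape, all cells 0
lemma pv_ans0_shape (N M : Nat) :
    pvShape N M ((List.range N).map (fun _ => (List.range M).map (fun _ => (0 : Int)))) := by
  constructor
  · simp
  · intro a ha
    simp [List.map_const', List.getD_eq_getElem?_getD, ha]

lemma pv_ans0_cell (N M a b : Nat) :
    pvCell ((List.range N).map (fun _ => (List.range M).map (fun _ => (0 : Int)))) a b = 0 := by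
  simp only [pvCell, List.map_const', List.length_range, List.getD_eq_getElem?_getD,
    List.getElem?_replicate]
  rcases Nat.lt_or_ge a N with ha | ha <;> rcases Nat.lt_or_ge b M with hb | hb <;>
    simp [ha, hb, Nat.not_lt.mpr]

-- ===== pass 2 (scatter of the anchors) =====

-- the value B computes at cell (a, b)
def pvV (matrix : List (List Int)) (kn a b : Nat) : Int :=
  (matrix.getD (a / kn) []).getD (b / kn) 0

lemma pv_pass2_invariant (matrix : List (List Int)) (kn n m : Nat) (hkn : 0 < kn) :
    ∀ t, t ≤ n * m →
      pvShape (kn * n) (kn * m)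
        ((List.range t).foldl
          (fun g t' => pvWrite g (t' / m * kn) (t' % m * kn) ((matrix.getD (t' / m) []).getD (t' % m) 0))
          ((List.range (kn * n)).map (fun _ => (List.range (kn * m)).map (fun _ => (0 : Int))))) ∧
      ∀ a b, a < kn * n → b < kn * m →
        pvCell
          ((List.range t).foldl
            (fun g t' => pvWrite g (t' / m * kn) (t' % m * kn) ((matrix.getD (t' / m) []).getD (t' % m) 0))
            ((List.range (kn * n)).map (fun _ => (List.range (kn * m)).map (fun _ => (0 : Int))))) a b
          = if a % kn = 0 ∧ b % kn = 0 ∧ a / kn * m + b / kn < t then pvV matrix kn a b else 0 := by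
  intro t
  induction t with
  | zero =>
    intro _
    simp only [List.range_zero, List.foldl_nil]
    refine ⟨pv_ans0_shape _ _, ?_⟩
    intro a b _ _
    rw [pv_ans0_cell]
    simp
  | succ t ih =>
    intro ht
    have ht' : t < n * m := ht
    obtain ⟨ihS, ihC⟩ := ih (Nat.le_of_lt ht')
    have hm : 0 < m := by
      rcases Nat.eq_zero_or_pos m with h | h
      · subst h; omega
      · exact h
    have hin : t / m < n := (Nat.div_lt_iff_lt_mul hm).mpr (by omega)
    have hiN : t / m * kn < kn * n := by
      rw [Nat.mul_comm kn n]
      exact Nat.mul_lt_mul_of_lt_of_le hin (Nat.le_refl kn) hkn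
    have hjm : t % m < m := Nat.mod_lt _ hm
    have hjM : t % m * kn < kn * m := by
      rw [Nat.mul_comm kn m]
      exact Nat.mul_lt_mul_of_lt_of_le hjm (Nat.le_refl kn) hkn
    rw [List.range_succ, List.foldl_append, List.foldl_cons, List.foldl_nil]
    refine ⟨pvShape_write _ _ _ _ _ _ ihS, ?_⟩
    intro a b ha hb
    rw [pvCell_write _ _ _ _ _ _ (by rw [ihS.1]; exact ha)
          (by rw [ihS.2 _ ha]; exact hb), ihC a b ha hb]
    have hda := Nat.div_add_mod a kn         -- kn * (a / kn) + a % kn = a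
    have hdb := Nat.div_add_mod b kn
    have hqa : a / kn < n := (Nat.div_lt_iff_lt_mul hkn).mpr (by rw [Nat.mul_comm]; exact ha)
    have hqb : b / kn < m := (Nat.div_lt_iff_lt_mul hkn).mpr (by rw [Nat.mul_comm]; exact hb)
    by_cases hcell : a = t / m * kn ∧ b = t % m * kn
    · obtain ⟨hca, hcb⟩ := hcell
      rw [if_pos ⟨hca, hcb⟩]
      have hra : a % kn = 0 := by rw [hca]; exact Nat.mul_mod_left _ _
      have hrb : b % kn = 0 := by rw [hcb]; exact Nat.mul_mod_left _ _
      have hqa' : a / kn = t / m := by rw [hca]; exact Nat.mul_div_cancel _ hkn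
      have hqb' : b / kn = t % m := by rw [hcb]; exact Nat.mul_div_cancel _ hkn
      have hrank : a / kn * m + b / kn = t := by
        rw [hqa', hqb', Nat.mul_comm]
        exact Nat.div_add_mod t m
      rw [if_pos ⟨hra, hrb, by omega⟩, pvV, hqa', hqb']
    · have hneq : ¬(a % kn = 0 ∧ b % kn = 0 ∧ a / kn * m + b / kn = t) := by
        intro ⟨hra, hrb, hrank⟩
        apply hcell
        have hcm : m * (a / kn) = a / kn * m := Nat.mul_comm _ _
        have h1 : t / m = a / kn ∧ t % m = b / kn :=
          (Nat.div_mod_unique (b := m) (a := t) (d := a / kn) (c := b / kn) hm).mpr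
            ⟨by omega, hqb⟩
        have hc1 : a / kn * kn = kn * (a / kn) := Nat.mul_comm _ _
        have hc2 : b / kn * kn = kn * (b / kn) := Nat.mul_comm _ _
        constructor
        · rw [h1.1, hc1]; omega
        · rw [h1.2, hc2]; omega
      rw [if_neg hcell]
      by_cases hold : a % kn = 0 ∧ b % kn = 0 ∧ a / kn * m + b / kn < t
      · rw [if_pos hold, if_pos ⟨hold.1, hold.2.1, by omega⟩]
      · rw [if_neg hold, if_neg (by
          rintro ⟨h1, h2, h3⟩
          rcases Nat.lt_or_ge (a / kn * m + b / kn) t with h | h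
          · exact hold ⟨h1, h2, h⟩
          · exact hneq ⟨h1, h2, by omega⟩)]

-- ===== pass 3 (propagation) =====

lemma pv_pass3_invariant (matrix : List (List Int)) (kn n m : Nat) (hkn : 0 < kn)
    (g1 : List (List Int)) (hS1 : pvShape (kn * n) (kn * m) g1)
    (hC1 : ∀ a b, a < kn * n → b < kn * m →
      pvCell g1 a b = if a % kn = 0 ∧ b % kn = 0 then pvV matrix kn a b else 0) :
    ∀ t, t ≤ (kn * n) * (kn * m) →
      pvShape (kn * n) (kn * m)
        ((List.range t).foldl
          (fun g t' => pvWrite g (t' / (kn * m)) (t' % (kn * m))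
            (pvCell g (t' / (kn * m) - t' / (kn * m) % kn) (t' % (kn * m) - t' % (kn * m) % kn))) g1) ∧
      ∀ a b, a < kn * n → b < kn * m →
        pvCell
          ((List.range t).foldl
            (fun g t' => pvWrite g (t' / (kn * m)) (t' % (kn * m))
              (pvCell g (t' / (kn * m) - t' / (kn * m) % kn) (t' % (kn * m) - t' % (kn * m) % kn))) g1) a b
          = if a * (kn * m) + b < t then pvV matrix kn a b
            else if a % kn = 0 ∧ b % kn = 0 then pvV matrix kn a b else 0 := by
  intro t
  induction t with
  | zero =>
    intro _
    simp only [List.range_zero, List.foldl_nil]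
    refine ⟨hS1, ?_⟩
    intro a b ha hb
    rw [hC1 a b ha hb]
    simp
  | succ t ih =>
    intro ht
    have ht' : t < (kn * n) * (kn * m) := ht
    obtain ⟨ihS, ihC⟩ := ih (Nat.le_of_lt ht')
    have hM : 0 < kn * m := by
      rcases Nat.eq_zero_or_pos (kn * m) with h | h
      · rw [h, Nat.mul_zero] at ht'; omega
      · exact h
    have hi : t / (kn * m) < kn * n := (Nat.div_lt_iff_lt_mul hM).mpr (by omega)
    have hj : t % (kn * m) < kn * m := Nat.mod_lt _ hM
    have hdm := Nat.div_add_mod t (kn * m)            -- (kn*m) * (t/(kn*m)) + t%(kn*m) = t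
    have hdi := Nat.div_add_mod (t / (kn * m)) kn     -- kn * (i/kn) + i%kn = i
    have hdj := Nat.div_add_mod (t % (kn * m)) kn
    have hci : t / (kn * m) - t / (kn * m) % kn = kn * (t / (kn * m) / kn) := by omega
    have hcj : t % (kn * m) - t % (kn * m) % kn = kn * (t % (kn * m) / kn) := by omega
    have hciq : (t / (kn * m) - t / (kn * m) % kn) / kn = t / (kn * m) / kn := by
      rw [hci, Nat.mul_div_cancel_left _ hkn]
    have hcjq : (t % (kn * m) - t % (kn * m) % kn) / kn = t % (kn * m) / kn := by
      rw [hcj, Nat.mul_div_cancel_left _ hkn]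
    have hcir : (t / (kn * m) - t / (kn * m) % kn) % kn = 0 := by
      rw [hci]; exact Nat.mul_mod_right _ _
    have hcjr : (t % (kn * m) - t % (kn * m) % kn) % kn = 0 := by
      rw [hcj]; exact Nat.mul_mod_right _ _
    have hciN : t / (kn * m) - t / (kn * m) % kn < kn * n := by omega
    have hcjM : t % (kn * m) - t % (kn * m) % kn < kn * m := by omega
    have hread :
        pvCell ((List.range t).foldl
          (fun g t' => pvWrite g (t' / (kn * m)) (t' % (kn * m))
            (pvCell g (t' / (kn * m) - t' / (kn * m) % kn) (t' % (kn * m) - t' % (kn * m) % kn))) g1)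
          (t / (kn * m) - t / (kn * m) % kn) (t % (kn * m) - t % (kn * m) % kn)
          = pvV matrix kn (t / (kn * m)) (t % (kn * m)) := by
      rw [ihC _ _ hciN hcjM]
      have hVeq : pvV matrix kn (t / (kn * m) - t / (kn * m) % kn) (t % (kn * m) - t % (kn * m) % kn)
          = pvV matrix kn (t / (kn * m)) (t % (kn * m)) := by
        rw [pvV, pvV, hciq, hcjq]
      split_ifs with h1 h2
      · exact hVeq
      · exact hVeq
      · exact absurd ⟨hcir, hcjr⟩ h2
    rw [List.range_succ, List.foldl_append, List.foldl_cons, List.foldl_nil]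
    refine ⟨pvShape_write _ _ _ _ _ _ ihS, ?_⟩
    intro a b ha hb
    rw [pvCell_write _ _ _ _ _ _ (by rw [ihS.1]; exact ha) (by rw [ihS.2 _ ha]; exact hb),
        hread, ihC a b ha hb]
    by_cases hcell : a = t / (kn * m) ∧ b = t % (kn * m)
    · obtain ⟨hca, hcb⟩ := hcell
      rw [if_pos ⟨hca, hcb⟩]
      have hrank : a * (kn * m) + b = t := by
        have hc : a * (kn * m) = (kn * m) * a := Nat.mul_comm _ _
        rw [hca, hcb] at *
        omega
      have hlt1 : a * (kn * m) + b < t + 1 := by omega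
      rw [if_pos hlt1, hca, hcb]
    · have huniq : a * (kn * m) + b ≠ t := by
        intro h
        apply hcell
        have hc : (kn * m) * a = a * (kn * m) := Nat.mul_comm _ _
        have h1 : t / (kn * m) = a ∧ t % (kn * m) = b :=
          (Nat.div_mod_unique (b := kn * m) (a := t) (d := a) (c := b) hM).mpr
            ⟨by omega, hb⟩
        exact ⟨h1.1.symm, h1.2.symm⟩
      rw [if_neg hcell]
      by_cases hlt : a * (kn * m) + b < t
      · have hlt1 : a * (kn * m) + b < t + 1 := by omega
        rw [if_pos hlt, if_pos hlt1]
      · have hlt1 : ¬a * (kn * m) + b < t + 1 := by omega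
        rw [if_neg hlt, if_neg hlt1]

-- bounded cells: a < N, b < M gives a * M + b < N * M
lemma pv_rank_lt (N M a b : Nat) (ha : a < N) (hb : b < M) : a * M + b < N * M := by
  have h1 : a + 1 ≤ N := ha
  have h2 : (a + 1) * M ≤ N * M := Nat.mul_le_mul_right M h1
  have h3 : (a + 1) * M = a * M + M := by ring
  omega

-- anchors always have rank below n * m
lemma pv_anchor_rank (kn n m a b : Nat) (hkn : 0 < kn)
    (ha : a < kn * n) (hb : b < kn * m) : a / kn * m + b / kn < n * m := by
  have hqa : a / kn < n := (Nat.div_lt_iff_lt_mul hkn).mpr (by rw [Nat.mul_comm]; exact ha)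
  have hqb : b / kn < m := (Nat.div_lt_iff_lt_mul hkn).mpr (by rw [Nat.mul_comm]; exact hb)
  exact pv_rank_lt n m _ _ hqa hqb

-- the main equality for k.toNat = kn > 0 (n, m arbitrary)
lemma pv_main (matrix : List (List Int)) (kn n m : Nat) (hkn : 0 < kn) :
    (List.range (kn * n)).foldl (fun g i =>
      (List.range (kn * m)).foldl (fun g j =>
        pvWrite g i j (pvCell g (i - i % kn) (j - j % kn))) g)
      ((List.range n).foldl (fun g i =>
        (List.range m).foldl (fun g j =>
          pvWrite g (i * kn) (j * kn) ((matrix.getD i []).getD j 0)) g)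
        ((List.range (kn * n)).map (fun _ => (List.range (kn * m)).map (fun _ => (0 : Int)))))
      = (List.range (kn * n)).map (fun i =>
          (List.range (kn * m)).map (fun j => (matrix.getD (i / kn) []).getD (j / kn) 0)) := by
  rw [pv_foldl_nested_rank, pv_foldl_nested_rank]
  obtain ⟨hS1, hC1⟩ := pv_pass2_invariant matrix kn n m hkn (n * m) (Nat.le_refl _)
  set g1 := (List.range (n * m)).foldl
    (fun g t' => pvWrite g (t' / m * kn) (t' % m * kn) ((matrix.getD (t' / m) []).getD (t' % m) 0))
    ((List.range (kn * n)).map (fun _ => (List.range (kn * m)).map (fun _ => (0 : Int)))) with hg1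
  have hC1' : ∀ a b, a < kn * n → b < kn * m →
      pvCell g1 a b = if a % kn = 0 ∧ b % kn = 0 then pvV matrix kn a b else 0 := by
    intro a b ha hb
    rw [hC1 a b ha hb]
    by_cases h : a % kn = 0 ∧ b % kn = 0
    · rw [if_pos ⟨h.1, h.2, pv_anchor_rank kn n m a b hkn ha hb⟩, if_pos h]
    · rw [if_neg (by tauto), if_neg h]
  obtain ⟨hS2, hC2⟩ := pv_pass3_invariant matrix kn n m hkn g1 hS1 hC1'
    ((kn * n) * (kn * m)) (Nat.le_refl _)
  set g2 := (List.range ((kn * n) * (kn * m))).foldl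
    (fun g t' => pvWrite g (t' / (kn * m)) (t' % (kn * m))
      (pvCell g (t' / (kn * m) - t' / (kn * m) % kn) (t' % (kn * m) - t' % (kn * m) % kn))) g1 with hg2
  apply List.ext_getElem
  · rw [hS2.1]; simp
  · intro a h1 h2
    have haN : a < kn * n := by rw [hS2.1] at h1; exact h1
    have hga : g2.getD a [] = g2[a] := by
      rw [List.getD_eq_getElem?_getD, List.getElem?_eq_getElem h1]; rfl
    rw [List.getElem_map, List.getElem_range]
    apply List.ext_getElem
    · rw [← hga, hS2.2 a haN]; simp
    · intro b hb1 hb2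
      have hbM : b < kn * m := by rw [← hga, hS2.2 a haN] at hb1; exact hb1
      have hcell := hC2 a b haN hbM
      rw [if_pos (pv_rank_lt _ _ _ _ haN hbM)] at hcell
      rw [List.getElem_map, List.getElem_range]
      rw [pvCell, hga] at hcell
      rw [List.getD_eq_getElem?_getD, List.getElem?_eq_getElem hb1, Option.getD_some] at hcell
      exact hcell

-- ===== VERDICT (by name: the statement is the Claim_ definition above) =====
theorem zooming_neighbor_spec : Claim_equal_zooming_neighbor := by
  intro matrix k _hdom _hpre
  unfold Spec_zooming_neighbor zooming_neighbor zooming_neighbor_alt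
  simp only []
  set n := matrix.length with hn
  set m := (matrix.getD 0 []).length with hm
  set kn := k.toNat with hkn
  rcases Nat.eq_zero_or_pos kn with hk0 | hkpos
  · -- k ≤ 0: the grid is empty on both sides (A's Lean folds are no-ops on [])
    rw [hk0]
    simp only [Nat.zero_mul, List.range_zero, List.map_nil, List.foldl_nil]
    refine pv_foldl_preserve (fun g => g = []) (List.range n) _ ?_ [] rfl
    intro g i hg
    subst hg
    refine pv_foldl_preserve (fun g => g = []) (List.range m) _ ?_ [] rfl
    intro g j hg
    subst hg
    simp [pvWrite]
  · exact pv_main matrix kn n m hkpos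

@[simp] theorem zooming_neighbor_raises : Claim_raises_zooming_neighbor := by
  unfold Claim_raises_zooming_neighbor
  refine ⟨?_, by decide⟩
  intro matrix k _hdom hr hpre
  obtain ⟨hne, hlen, hk⟩ := hr
  obtain ⟨_, hpre2⟩ := hpre
  rcases hpre2 with h0 | ⟨hk1, _⟩
  · omega
  · omega
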